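-- pv_equiv track=rewrite | github.com/kungfuai/CVlization | datasets/omr/openscore/page_musicxml.py | compute_page_ranges
-- ===== SOURCE A (Python) =====
-- def compute_page_ranges(bar_nums_per_page: dict[int, list[int]],
--                         total_measures: int) -> dict[int, tuple[int, int]]:
--     """
--     Given {page: [sorted bar numbers]} ([] = no bar nums on that page),
--     return {page: (bar_start, bar_end)} for pages WITH bar numbers only.
--
--     bar_start = min(bar nums on page N)
--     bar_end   = min(bar nums on next page WITH bar nums) - 1
--               (or total_measures for the last such page)
--
--     Pages with [] bar numbers are omitted from the output — their bars will
--     be absorbed into the adjacent pages' ranges.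
--     """
--     # Only work with pages that have extractable bar numbers
--     active = {p: nums for p, nums in bar_nums_per_page.items() if nums}
--     pages = sorted(active)
--     ranges = {}
--     for i, page in enumerate(pages):
--         bar_start = min(active[page])
--         # Skip pages whose bar_start exceeds the score length — LilyPond
--         # sometimes emits a "phantom" bar number after the final measure.
--         if bar_start > total_measures:
--             break
--         if i + 1 < len(pages):
--             next_page = pages[i + 1]
--             bar_end = min(active[next_page]) - 1
--         else:
--             bar_end = total_measures
--         ranges[page] = (bar_start, bar_end)
--     return ranges
-- ===== SOURCE B (Python) =====
-- def compute_page_ranges(bar_nums_per_page: dict[int, list[int]],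
--                         total_measures: int) -> dict[int, tuple[int, int]]:
--     # Build the full (page, start, end) table BACK-TO-FRONT, carrying the
--     # following page's start in an accumulator (no lookahead, no min rescan),
--     # then cut the table at the first start beyond the score length.
--     rows = sorted(((p, min(ns)) for p, ns in bar_nums_per_page.items() if ns), key=lambda t: t[0])
--     full = []
--     next_start = total_measures + 1
--     for page, start in reversed(rows):
--         full.append((page, start, next_start - 1))
--         next_start = start
--     full.reverse()
--     cut = len(full)
--     for i, (_, start, _) in enumerate(full):
--         if start > total_measures:
--             cut = i
--             break
--     return {page: (start, end) for page, start, end in full[:cut]}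
-- ===== Notes on version B (the rewrite author's own statement) =====
-- stated objective: alternative
-- what changed: Builds the whole (page, start, end) table back-to-front with a single carried next_start accumulator (each page's min computed once, no lookahead or index arithmetic), then truncates the table at the first start beyond total_measures in a separate prefix-cut pass, instead of A's forward enumerate loop that indexes pages[i+1] and recomputes min() for the next page inside the loop.
import Mathlib
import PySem

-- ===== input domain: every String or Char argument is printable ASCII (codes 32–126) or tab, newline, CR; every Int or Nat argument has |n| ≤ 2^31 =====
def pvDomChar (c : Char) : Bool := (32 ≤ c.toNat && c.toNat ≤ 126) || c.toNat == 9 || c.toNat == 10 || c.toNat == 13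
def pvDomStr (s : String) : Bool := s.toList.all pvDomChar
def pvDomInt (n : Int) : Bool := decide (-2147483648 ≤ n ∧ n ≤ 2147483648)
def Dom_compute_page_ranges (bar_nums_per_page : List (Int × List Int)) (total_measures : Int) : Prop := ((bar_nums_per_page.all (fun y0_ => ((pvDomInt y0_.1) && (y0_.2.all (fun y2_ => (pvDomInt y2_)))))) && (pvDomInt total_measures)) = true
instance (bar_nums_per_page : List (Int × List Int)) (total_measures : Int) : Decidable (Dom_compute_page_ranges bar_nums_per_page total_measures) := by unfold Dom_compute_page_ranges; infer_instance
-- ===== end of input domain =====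

-- B builds the (page, start, end) table back-to-front carrying the next page's
-- start in an accumulator, then cuts the table at the first phantom start,
-- instead of A's forward enumerate loop with pages[i+1] lookahead and min() rescans.


-- min(xs) for a nonempty Int list (both Pythons only call it on nonempty lists; the default is unreachable)
def pyMinD (xs : List Int) : Int := (PySem.List.min? xs (fun x => x)).getD 0

-- ===== PORT A =====
-- the 'for i, page in enumerate(pages)' loop with break; 'i+1 < len(pages)'/'pages[i+1]'
-- is rendered as the head of the remaining pages
def cprLoopA (active : PySem.Dict Int (List Int)) (total_measures : Int) :
    List Int → PySem.Dict Int (Int × Int) → PySem.Dict Int (Int × Int)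
  | [], ranges => ranges
  | page :: rest, ranges =>
    let bar_start := pyMinD (active.getD page [])
    if bar_start > total_measures then ranges
    else
      let bar_end := match rest with
        | next_page :: _ => pyMinD (active.getD next_page []) - 1
        | [] => total_measures
      cprLoopA active total_measures rest (ranges.insert page (bar_start, bar_end))

def compute_page_ranges (bar_nums_per_page : List (Int × List Int)) (total_measures : Int) : List (Int × Int × Int) :=
  let active := bar_nums_per_page.foldl
    (fun d pn => if pn.2.isEmpty then d else d.insert pn.1 pn.2) PySem.Dict.empty
  let pages := PySem.List.sorted active.keys (fun p => p) false
  (cprLoopA active total_measures pages PySem.Dict.empty).items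

-- ===== PORT B =====
-- the 'for i, (_, start, _) in enumerate(full): if start > total: cut = i; break' search
def cprCutIdx (total_measures : Int) : List (Int × Int × Int) → Nat
  | [] => 0
  | t :: rest => if t.2.1 > total_measures then 0 else cprCutIdx total_measures rest + 1

def compute_page_ranges_alt (bar_nums_per_page : List (Int × List Int)) (total_measures : Int) : List (Int × Int × Int) :=
  let rows := PySem.List.sorted
    ((bar_nums_per_page.filter (fun pn => !pn.2.isEmpty)).map (fun pn => (pn.1, pyMinD pn.2)))
    (fun t => t.1) false
  -- 'for page, start in reversed(rows): full.append(...); next_start = start', then full.reverse()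
  let built := rows.reverse.foldl
    (fun (st : List (Int × Int × Int) × Int) ps => (st.1 ++ [(ps.1, ps.2, st.2 - 1)], ps.2))
    ([], total_measures + 1)
  let full := built.1.reverse
  let cut := cprCutIdx total_measures full
  -- the dict comprehension over full[:cut]
  ((full.take cut).foldl (fun d t => d.insert t.1 t.2)
    (PySem.Dict.empty : PySem.Dict Int (Int × Int))).items

-- ===== PRECONDITION & SPEC =====
-- Pre_ only requires the association list to have pairwise-distinct keys: the Python
-- argument is a dict, so a duplicate-key list corresponds to no Python input at all.
def Pre_compute_page_ranges (bar_nums_per_page : List (Int × List Int)) (total_measures : Int) : Prop :=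
  (bar_nums_per_page.map Prod.fst).Nodup
instance (bar_nums_per_page : List (Int × List Int)) (total_measures : Int) : Decidable (Pre_compute_page_ranges bar_nums_per_page total_measures) := by unfold Pre_compute_page_ranges; infer_instance

def pvWitness_compute_page_ranges : (List (Int × List Int)) × Int := ([(1, [1, 2]), (2, []), (3, [5])], 10)

def Spec_compute_page_ranges (bar_nums_per_page : List (Int × List Int)) (total_measures : Int) (out : List (Int × Int × Int)) : Prop := out = compute_page_ranges_alt bar_nums_per_page total_measures
instance (bar_nums_per_page : List (Int × List Int)) (total_measures : Int) (out : List (Int × Int × Int)) : Decidable (Spec_compute_page_ranges bar_nums_per_page total_measures out) := by unfold Spec_compute_page_ranges; infer_instance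

-- ===== CLAIM (what is proved, stated in full; the proofs are below) =====
def Claim_equal_compute_page_ranges : Prop := ∀ (bar_nums_per_page : List (Int × List Int)) (total_measures : Int), Dom_compute_page_ranges bar_nums_per_page total_measures → Pre_compute_page_ranges bar_nums_per_page total_measures → Spec_compute_page_ranges bar_nums_per_page total_measures (compute_page_ranges bar_nums_per_page total_measures)

-- ===== LEMMAS AND PROOFS =====

-- proof-side bridge: A's loop rendered as a break-loop over the pairwise zip table
def cprLoopB (total_measures : Int) :
    List ((Int × Int) × (Int × Int)) → List (Int × Int × Int) → List (Int × Int × Int)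
  | [], ranges => ranges
  | ((page, start), (_, next_start)) :: rest, ranges =>
    if start > total_measures then ranges
    else cprLoopB total_measures rest (ranges ++ [(page, start, next_start - 1)])

def toTrip (pr : (Int × Int) × (Int × Int)) : Int × Int × Int := (pr.1.1, pr.1.2, pr.2.2 - 1)

-- the filtered comprehension fold equals the plain insert fold over the filtered list
lemma foldl_insert_filter (l : List (Int × List Int)) (d : PySem.Dict Int (List Int)) :
    l.foldl (fun d pn => if pn.2.isEmpty then d else d.insert pn.1 pn.2) d
      = (l.filter (fun pn => !pn.2.isEmpty)).foldl (fun d pn => d.insert pn.1 pn.2) d := by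
  induction l generalizing d with
  | nil => rfl
  | cons pn rest ih =>
    rw [List.foldl_cons, List.filter_cons]
    by_cases h : pn.2.isEmpty = true
    · rw [if_pos h, h]; simpa using ih d
    · rw [if_neg h, eq_false_of_ne_true h]; simpa using ih (d.insert pn.1 pn.2)

-- the loops agree, given that the zip table is exactly the A pages mapped through their start values
lemma loop_eq (active : PySem.Dict Int (List Int)) (total : Int) :
    ∀ (pages : List Int) (r : PySem.Dict Int (Int × Int)) (acc : List (Int × Int × Int)),
      pages.Nodup → (∀ p ∈ pages, r.contains p = false) → r.items = acc →
      (cprLoopA active total pages r).items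
        = cprLoopB total
            (((pages.map (fun p => (p, pyMinD (active.getD p [])))).zip
              ((pages.map (fun p => (p, pyMinD (active.getD p [])))).drop 1 ++ [(0, total + 1)])))
            acc := by
  intro pages
  induction pages with
  | nil => intro r acc _ _ hitems; simpa [cprLoopA, cprLoopB] using hitems
  | cons p rest ih =>
    intro r acc hnd hfresh hitems
    have hp : r.contains p = false := hfresh p (by simp)
    cases rest with
    | nil =>
      simp only [List.map_cons, List.map_nil, List.drop_one, List.tail_cons, List.nil_append,
        List.zip_cons_cons, List.zip_nil_left]
      simp only [cprLoopA, cprLoopB]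
      by_cases hgt : pyMinD (active.getD p []) > total
      · simp [hgt, hitems]
      · have hins := PySem.Dict.items_insert_of_not_contains r
          (k := p) (pyMinD (active.getD p []), total) hp
        simp only [hgt, if_false, hins, hitems]
        norm_num
    | cons q rest' =>
      simp only [List.map_cons, List.drop_one, List.tail_cons, List.cons_append,
        List.zip_cons_cons]
      simp only [cprLoopA, cprLoopB]
      by_cases hgt : pyMinD (active.getD p []) > total
      · simp [hgt, hitems]
      · simp only [hgt, if_false]
        have hins := PySem.Dict.items_insert_of_not_contains r
          (k := p) (pyMinD (active.getD p []), pyMinD (active.getD q []) - 1) hp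
        have hfresh' : ∀ x ∈ q :: rest',
            (r.insert p (pyMinD (active.getD p []), pyMinD (active.getD q []) - 1)).contains x
              = false := by
          intro x hx
          rw [PySem.Dict.contains_insert]
          have hxp : x ≠ p := by
            rintro rfl; exact (List.nodup_cons.mp hnd).1 hx
          simp [hxp, hfresh x (List.mem_cons_of_mem _ hx)]
        have hrest := ih _ (acc ++ [(p, pyMinD (active.getD p []), pyMinD (active.getD q []) - 1)])
          (List.nodup_cons.mp hnd).2 hfresh' (by rw [hins, hitems])
        simpa using hrest

lemma sorted_starts_eq (F : List (Int × List Int)) (active : PySem.Dict Int (List Int))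
    (hitems : active.items = F) (hnd : (F.map Prod.fst).Nodup) :
    PySem.List.sorted (F.map (fun pn => (pn.1, pyMinD pn.2))) (fun t => t.1) false
      = (PySem.List.sorted active.keys (fun p => p) false).map
          (fun p => (p, pyMinD (active.getD p []))) := by
  have hkeys : active.keys = F.map Prod.fst := by
    simp [PySem.Dict.keys, hitems]
  have hknd : active.keys.Nodup := by rw [hkeys]; exact hnd
  apply PySem.List.sorted_eq_of_perm_of_pairwise_lt
  · have h1 : (PySem.List.sorted active.keys (fun p => p) false).Perm active.keys :=
      PySem.List.sorted_perm _ _ _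
    have h2 := h1.map (fun p => (p, pyMinD (active.getD p [])))
    refine h2.trans ?_
    rw [hkeys, List.map_map]
    apply List.Perm.of_eq
    apply List.map_congr_left
    intro pn hpn
    have hmem : (pn.1, pn.2) ∈ active.items := by rw [hitems]; simpa using hpn
    have hget : active.getD pn.1 [] = pn.2 :=
      PySem.Dict.getD_of_mem_items active hmem hknd []
    simp [Function.comp, hget]
  · have hsp : (PySem.List.sorted active.keys (fun p => p) false).Pairwise (fun a b => a ≤ b) :=
      PySem.List.sorted_pairwise _ _
    have hsnd : (PySem.List.sorted active.keys (fun p => p) false).Nodup :=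
      (PySem.List.sorted_perm _ _ _).nodup_iff.mpr hknd
    have hlt : (PySem.List.sorted active.keys (fun p => p) false).Pairwise (fun a b => a < b) := by
      have := hsp.and (List.nodup_iff_pairwise_ne.mp hsnd)
      exact this.imp (fun ⟨hle, hne⟩ => lt_of_le_of_ne hle hne)
    exact (List.pairwise_map).mpr hlt

-- the break-loop is takeWhile-then-map over the zip table
lemma loopB_takeWhile (total : Int) :
    ∀ (zl : List ((Int × Int) × (Int × Int))) (acc : List (Int × Int × Int)),
      cprLoopB total zl acc
        = acc ++ (zl.takeWhile (fun pr => !(decide (pr.1.2 > total)))).map toTrip := by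
  intro zl
  induction zl with
  | nil => intro acc; simp [cprLoopB]
  | cons pr rest ih =>
    intro acc
    obtain ⟨⟨page, start⟩, np, ns⟩ := pr
    by_cases h : start > total
    · simp [cprLoopB, h]
    · simp only [cprLoopB, h, if_false, List.takeWhile_cons]
      rw [ih]
      simp [toTrip]

-- the cut index realises takeWhile
lemma cut_takeWhile (total : Int) :
    ∀ (L : List (Int × Int × Int)),
      L.take (cprCutIdx total L) = L.takeWhile (fun t => !(decide (t.2.1 > total))) := by
  intro L
  induction L with
  | nil => rfl
  | cons t rest ih =>
    by_cases h : t.2.1 > total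
    · simp [cprCutIdx, h]
    · simp [cprCutIdx, h, ih]

-- the reverse fold builds exactly the zip table's triples (reversed), carrying the head start
lemma revbuild (total : Int) :
    ∀ (rows : List (Int × Int)),
      rows.foldr (fun ps (st : List (Int × Int × Int) × Int) =>
          (st.1 ++ [(ps.1, ps.2, st.2 - 1)], ps.2)) ([], total + 1)
        = (((rows.zip (rows.drop 1 ++ [((0 : Int), total + 1)])).map toTrip).reverse,
            (rows.headD (0, total + 1)).2) := by
  intro rows
  induction rows with
  | nil => simp
  | cons p rest ih =>
    rw [List.foldr_cons, ih]
    cases rest with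
    | nil => simp [toTrip]
    | cons q rest' => simp [toTrip]

-- ===== VERDICT (by name: the statement is the Claim_ definition above) =====
theorem compute_page_ranges_spec : Claim_equal_compute_page_ranges := by
  intro l total _ hpre
  unfold Spec_compute_page_ranges compute_page_ranges compute_page_ranges_alt
  set F := l.filter (fun pn => !pn.2.isEmpty) with hF
  have hFsub : F.Sublist l := List.filter_sublist
  have hFnd : (F.map Prod.fst).Nodup := ((hFsub.map Prod.fst).nodup hpre)
  have hitems : (l.foldl (fun d pn => if pn.2.isEmpty then d else d.insert pn.1 pn.2)
      PySem.Dict.empty).items = F := by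
    rw [foldl_insert_filter]
    rw [PySem.Dict.items_foldl_insert_fresh (k := Prod.fst) (v := Prod.snd)
      (d := PySem.Dict.empty) F (fun a _ => PySem.Dict.contains_empty a.1) hFnd]
    simp [show (PySem.Dict.empty : PySem.Dict Int (List Int)).items = [] from rfl]
  set active := l.foldl (fun d pn => if pn.2.isEmpty then d else d.insert pn.1 pn.2)
      PySem.Dict.empty with hact
  have hknd : (PySem.List.sorted active.keys (fun p => p) false).Nodup := by
    refine (PySem.List.sorted_perm _ _ _).nodup_iff.mpr ?_
    simpa [PySem.Dict.keys, hitems] using hFnd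
  -- names
  set rows := PySem.List.sorted (F.map (fun pn => (pn.1, pyMinD pn.2))) (fun t => t.1) false
    with hrows
  have hrt : rows = (PySem.List.sorted active.keys (fun p => p) false).map
      (fun p => (p, pyMinD (active.getD p []))) := sorted_starts_eq F active hitems hFnd
  -- A side
  have hA : (cprLoopA active total (PySem.List.sorted active.keys (fun p => p) false)
        PySem.Dict.empty).items
      = ((rows.zip (rows.drop 1 ++ [((0 : Int), total + 1)])).takeWhile
          (fun pr => !(decide (pr.1.2 > total)))).map toTrip := by
    rw [loop_eq active total _ PySem.Dict.empty [] hknd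
      (fun p _ => PySem.Dict.contains_empty p) rfl, ← hrt, loopB_takeWhile]
    simp
  -- B side
  have hfull : ((rows.reverse.foldl
      (fun (st : List (Int × Int × Int) × Int) ps => (st.1 ++ [(ps.1, ps.2, st.2 - 1)], ps.2))
      ([], total + 1)).1).reverse
      = (rows.zip (rows.drop 1 ++ [((0 : Int), total + 1)])).map toTrip := by
    rw [List.foldl_reverse]
    rw [revbuild total rows]
    simp
  set zt := (rows.zip (rows.drop 1 ++ [((0 : Int), total + 1)])).map toTrip with hzt
  have hcut : zt.take (cprCutIdx total zt)
      = ((rows.zip (rows.drop 1 ++ [((0 : Int), total + 1)])).takeWhile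
          (fun pr => !(decide (pr.1.2 > total)))).map toTrip := by
    rw [cut_takeWhile, hzt, List.takeWhile_map]
    rfl
  -- nodup keys of the taken prefix
  have hkeys_full : zt.map Prod.fst = rows.map Prod.fst := by
    rw [hzt, List.map_map]
    have hlen : rows.length ≤ (rows.drop 1 ++ [((0 : Int), total + 1)]).length := by
      cases rows <;> simp
    have := List.map_fst_zip (l₁ := rows) (l₂ := rows.drop 1 ++ [((0 : Int), total + 1)]) hlen
    calc (rows.zip (rows.drop 1 ++ [((0 : Int), total + 1)])).map (Prod.fst ∘ toTrip)
        = ((rows.zip (rows.drop 1 ++ [((0 : Int), total + 1)])).map Prod.fst).map Prod.fst := by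
          rw [List.map_map]; rfl
      _ = rows.map Prod.fst := by rw [this]
  have hrnd : (rows.map Prod.fst).Nodup := by
    have hperm : rows.Perm (F.map (fun pn => (pn.1, pyMinD pn.2))) := PySem.List.sorted_perm _ _ _
    refine (hperm.map Prod.fst).nodup_iff.mpr ?_
    rw [List.map_map]
    simpa [Function.comp] using hFnd
  have hztnd : (zt.map Prod.fst).Nodup := by rw [hkeys_full]; exact hrnd
  have htaked : ((zt.take (cprCutIdx total zt)).map Prod.fst).Nodup :=
    ((List.take_sublist _ _).map Prod.fst).nodup hztnd
  have hBitems : (((zt.take (cprCutIdx total zt)).foldl (fun d t => d.insert t.1 t.2)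
      (PySem.Dict.empty : PySem.Dict Int (Int × Int))).items)
      = zt.take (cprCutIdx total zt) := by
    rw [PySem.Dict.items_foldl_insert_fresh (k := Prod.fst) (v := Prod.snd)
      (d := PySem.Dict.empty) _ (fun a _ => PySem.Dict.contains_empty a.1) htaked]
    simp [show (PySem.Dict.empty : PySem.Dict Int (Int × Int)).items = [] from rfl]
  simp only [hfull]
  rw [hA, hBitems, hcut]
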